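-- pv_equiv track=rewrite | github.com/eurnie/AdventOfCode | 2020/14/puzzle1.py | calculateMemoryValue
-- ===== SOURCE A (Python) =====
-- def calculateMemoryValue(binaryList, mask):
-- 	newBinaryList = []
-- 	for i in range(0, len(mask)):
-- 		if (mask[i] == 'X'):
-- 			newBinaryList.append(binaryList[i])
-- 		elif (mask[i] == '0'):
-- 			newBinaryList.append(0)
-- 		elif (mask[i] == '1'):
-- 			newBinaryList.append(1)
-- 	return toNumber(newBinaryList)
--
-- def toNumber(binaryList):
-- 	counter = 0
-- 	for i in range(0, len(binaryList)):
-- 		counter += binaryList[len(binaryList)-i-1] * (2 ** i)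
-- 	return counter
-- ===== SOURCE B (Python) =====
-- def calculateMemoryValue(binaryList, mask):
--     result = 0
--     for i, c in enumerate(mask):
--         if c == 'X':
--             result = result * 2 + binaryList[i]
--         elif c == '0':
--             result = result * 2
--         elif c == '1':
--             result = result * 2 + 1
--     return result
-- ===== Notes on version B (the rewrite author's own statement) =====
-- stated objective: simpler
-- what changed: Replaces A's two-pass scheme (build a filtered bit list, then convert it with a 2**i power table indexed from the back) by a single left-to-right Horner pass over the mask that accumulates result = result*2 + bit directly, with no intermediate list.
import Mathlib
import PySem

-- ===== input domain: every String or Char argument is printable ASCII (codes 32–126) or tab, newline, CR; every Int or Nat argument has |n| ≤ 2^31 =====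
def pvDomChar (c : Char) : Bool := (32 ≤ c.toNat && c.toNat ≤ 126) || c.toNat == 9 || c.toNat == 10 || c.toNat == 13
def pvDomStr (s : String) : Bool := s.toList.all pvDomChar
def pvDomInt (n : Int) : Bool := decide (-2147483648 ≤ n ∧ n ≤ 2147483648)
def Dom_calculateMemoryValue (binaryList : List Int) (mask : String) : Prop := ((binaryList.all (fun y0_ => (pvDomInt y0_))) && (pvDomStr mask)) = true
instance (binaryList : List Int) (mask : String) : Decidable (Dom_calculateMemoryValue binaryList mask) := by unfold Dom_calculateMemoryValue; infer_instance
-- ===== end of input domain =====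

-- B replaces A's build-a-filtered-list-then-convert-with-2**i-weights by a single Horner pass over the mask (simpler; return value only).


-- ===== PORT A =====
-- helper toNumber: counter += binaryList[len-i-1] * 2**i over range(0, len)
def pvToNumber (binaryList : List Int) : Int :=
  (PySem.List.pyRange 0 (binaryList.length : Int) 1).foldl
    (fun counter i =>
      counter + PySem.List.pyGetD binaryList ((binaryList.length : Int) - i - 1) 0 * 2 ^ i.toNat)
    0

def calculateMemoryValue (binaryList : List Int) (mask : String) : Int :=
  let newBinaryList :=
    (PySem.List.pyRange 0 (mask.toList.length : Int) 1).foldl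
      (fun acc i =>
        if PySem.Str.pyGet? mask i = some 'X' then acc ++ [PySem.List.pyGetD binaryList i 0]
        else if PySem.Str.pyGet? mask i = some '0' then acc ++ [(0 : Int)]
        else if PySem.Str.pyGet? mask i = some '1' then acc ++ [(1 : Int)]
        else acc)
      []
  pvToNumber newBinaryList

-- ===== PORT B =====
def calculateMemoryValue_alt (binaryList : List Int) (mask : String) : Int :=
  (PySem.List.enumerate mask.toList 0).foldl
    (fun result p =>
      if p.2 = 'X' then result * 2 + PySem.List.pyGetD binaryList p.1 0
      else if p.2 = '0' then result * 2
      else if p.2 = '1' then result * 2 + 1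
      else result)
    0

-- ===== PRECONDITION & SPEC =====
-- Pre_ excludes exactly the inputs where Python A raises IndexError: an 'X' in mask at a position ≥ len(binaryList).
def Pre_calculateMemoryValue (binaryList : List Int) (mask : String) : Prop :=
  ∀ p ∈ PySem.List.enumerate mask.toList 0, p.2 = 'X' → p.1 < (binaryList.length : Int)
instance (binaryList : List Int) (mask : String) : Decidable (Pre_calculateMemoryValue binaryList mask) := by
  unfold Pre_calculateMemoryValue; infer_instance
def pvWitness_calculateMemoryValue : List Int × String := (([1, 0, 1] : List Int), "X0X1")
def Spec_calculateMemoryValue (binaryList : List Int) (mask : String) (out : Int) : Prop := out = calculateMemoryValue_alt binaryList mask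
instance (binaryList : List Int) (mask : String) (out : Int) : Decidable (Spec_calculateMemoryValue binaryList mask out) := by unfold Spec_calculateMemoryValue; infer_instance

-- ===== CLAIM (what is proved, stated in full; the proofs are below) =====
def Claim_equal_calculateMemoryValue : Prop := ∀ (binaryList : List Int) (mask : String), Dom_calculateMemoryValue binaryList mask → Pre_calculateMemoryValue binaryList mask → Spec_calculateMemoryValue binaryList mask (calculateMemoryValue binaryList mask)

-- ===== LEMMAS AND PROOFS =====

-- Horner evaluation of a bit list (proof-side helper)
def pvHorner (L : List Int) : Int := L.foldl (fun a b => a * 2 + b) 0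

theorem pvHorner_append_singleton (L : List Int) (b : Int) :
    pvHorner (L ++ [b]) = pvHorner L * 2 + b := by
  simp [pvHorner]

theorem pvHorner_shift (L : List Int) (init : Int) :
    L.foldl (fun a b => a * 2 + b) init = init * 2 ^ L.length + pvHorner L := by
  induction L generalizing init with
  | nil => simp [pvHorner]
  | cons a L ih =>
    simp only [List.foldl_cons, pvHorner, List.length_cons]
    rw [ih (init * 2 + a), ih ((0 : Int) * 2 + a)]
    ring

-- toNumber computes the Horner value
theorem pvToNumber_eq_horner (L : List Int) : pvToNumber L = pvHorner L := by
  induction L with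
  | nil => simp [pvToNumber, pvHorner]
  | cons a L ih =>
    have hn : ((a :: L).length : Int) = (L.length : Int) + 1 := by
      simp
    unfold pvToNumber
    rw [hn, PySem.List.pyRange_one_succ_right (by positivity), List.foldl_append]
    simp only [List.foldl_cons, List.foldl_nil]
    have hcongr :
        (PySem.List.pyRange 0 (L.length : Int) 1).foldl
          (fun counter i =>
            counter + PySem.List.pyGetD (a :: L) ((L.length : Int) + 1 - i - 1) 0 * 2 ^ i.toNat) 0
        = (PySem.List.pyRange 0 (L.length : Int) 1).foldl
          (fun counter i =>
            counter + PySem.List.pyGetD L ((L.length : Int) - i - 1) 0 * 2 ^ i.toNat) 0 := by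
      apply PySem.List.foldl_congr_mem
      intro acc i hi
      rw [PySem.List.mem_pyRange_one] at hi
      have h1 : PySem.List.pyGetD (a :: L) ((L.length : Int) + 1 - i - 1) 0
          = PySem.List.pyGetD L ((L.length : Int) - i - 1) 0 := by
        have h2 : (L.length : Int) + 1 - i - 1 = ((L.length : Int) - i - 1) + 1 := by ring
        rw [h2]
        have h3 : 0 ≤ (L.length : Int) - i - 1 := by omega
        obtain ⟨k, hk⟩ := Int.eq_ofNat_of_zero_le h3
        rw [hk]
        have : ((k : Int)) + 1 = ((k + 1 : Nat) : Int) := by push_cast; ring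
        rw [this, PySem.List.pyGetD_natCast]
        simp [List.getD]
      rw [h1]
    rw [hcongr]
    have hlast : PySem.List.pyGetD (a :: L) ((L.length : Int) + 1 - (L.length : Int) - 1) 0 = a := by
      have : (L.length : Int) + 1 - (L.length : Int) - 1 = 0 := by ring
      rw [this]; simp [PySem.List.pyGetD_zero_cons]
    rw [hlast]
    have hfold : (PySem.List.pyRange 0 (L.length : Int) 1).foldl
        (fun counter i =>
          counter + PySem.List.pyGetD L ((L.length : Int) - i - 1) 0 * 2 ^ i.toNat) 0
        = pvToNumber L := by rfl
    rw [hfold, ih]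
    have hexp : ((L.length : Int)).toNat = L.length := by simp
    rw [hexp]
    calc pvHorner L + a * 2 ^ L.length
        = a * 2 ^ L.length + pvHorner L := by ring
      _ = List.foldl (fun a b => a * 2 + b) a L := (pvHorner_shift L a).symm
      _ = pvHorner (a :: L) := by simp [pvHorner]

-- the main invariant: over any prefix of the index range, B's Horner accumulator equals
-- the Horner value of A's built list
theorem pvMain (binaryList : List Int) (mask : String) (m : Nat) (hm : m ≤ mask.toList.length) :
    (PySem.List.pyRange 0 (m : Int) 1).foldl
      (fun result j =>
        if PySem.Str.pyGet? mask j = some 'X' then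
          result * 2 + PySem.List.pyGetD binaryList j 0
        else if PySem.Str.pyGet? mask j = some '0' then result * 2
        else if PySem.Str.pyGet? mask j = some '1' then result * 2 + 1
        else result) 0
    = pvHorner
      ((PySem.List.pyRange 0 (m : Int) 1).foldl
        (fun acc i =>
          if PySem.Str.pyGet? mask i = some 'X' then acc ++ [PySem.List.pyGetD binaryList i 0]
          else if PySem.Str.pyGet? mask i = some '0' then acc ++ [(0 : Int)]
          else if PySem.Str.pyGet? mask i = some '1' then acc ++ [(1 : Int)]
          else acc)
        []) := by
  induction m with
  | zero => simp [pvHorner]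
  | succ k ih =>
    have hk : k ≤ mask.toList.length := Nat.le_of_succ_le hm
    have hcast : ((k + 1 : Nat) : Int) = (k : Int) + 1 := by push_cast; ring
    rw [hcast, PySem.List.pyRange_one_succ_right (by positivity), List.foldl_append,
        List.foldl_append, ih hk]
    simp only [List.foldl_cons, List.foldl_nil]
    split_ifs with h1 h2 h3 <;>
      simp [pvHorner_append_singleton]

-- B's fold over enumerate, rewritten as a fold over the index range
theorem pvAltEq (binaryList : List Int) (mask : String) :
    calculateMemoryValue_alt binaryList mask
    = (PySem.List.pyRange 0 (mask.toList.length : Int) 1).foldl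
      (fun result j =>
        if PySem.Str.pyGet? mask j = some 'X' then
          result * 2 + PySem.List.pyGetD binaryList j 0
        else if PySem.Str.pyGet? mask j = some '0' then result * 2
        else if PySem.Str.pyGet? mask j = some '1' then result * 2 + 1
        else result) 0 := by
  unfold calculateMemoryValue_alt
  rw [PySem.List.enumerate_eq_map_pyRange mask.toList 'A', List.foldl_map]
  simp only [PySem.List.len]
  apply PySem.List.foldl_congr_mem
  intro acc j hj
  rw [PySem.List.mem_pyRange_one] at hj
  obtain ⟨n, hn⟩ := Int.eq_ofNat_of_zero_le hj.1
  subst hn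
  have hlt : n < mask.toList.length := by exact_mod_cast hj.2
  have hget : PySem.Str.pyGet? mask (n : Int) = some (mask.toList[n]'hlt) := by
    simp [List.getElem?_eq_getElem hlt]
  have hgd : PySem.List.pyGetD mask.toList (n : Int) 'A' = mask.toList[n]'hlt := by
    simp [PySem.List.pyGetD_natCast, List.getD_eq_getElem?_getD, List.getElem?_eq_getElem hlt]
  simp only [hget, hgd, Option.some.injEq]

-- ===== VERDICT (by name: the statement is the Claim_ definition above) =====
theorem calculateMemoryValue_spec : Claim_equal_calculateMemoryValue := by
  intro binaryList mask _ _
  unfold Spec_calculateMemoryValue calculateMemoryValue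
  rw [pvAltEq, pvToNumber_eq_horner]
  exact (pvMain binaryList mask mask.toList.length le_rfl).symm
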